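-- pv_equiv track=rewrite | github.com/tycyd/codeforces | dfs/1187E Tree Painting.py | dfs
-- ===== SOURCE A (Python) =====
-- def dfs(pn, cn, dic, memo):
--     if pn in memo and cn in memo[pn]:
--         return memo[pn][cn]
--     if pn not in memo:
--         memo[pn] = {}
--
--     r1 = 1
--     r2 = 0
--     for nn in dic[cn]:
--         if nn == pn:
--             continue
--         r = dfs(cn, nn, dic, memo)
--         r1 += r[0]
--         r2 += r[1]
--     r2 += r1
--
--     memo[pn][cn] = [r1, r2]
--     return memo[pn][cn]
-- ===== SOURCE B (Python) =====
-- def dfs(pn, cn, dic, memo):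
--     # Iterative post-order DFS with an explicit frame stack (same memo side effects as the
--     # recursive original: cache-hit check, memo[parent] creation at first visit, post-order write).
--     if pn in memo and cn in memo[pn]:
--         return memo[pn][cn]
--     stack = [(pn, cn, False)]
--     while stack:
--         p, c, post = stack.pop()
--         if post:
--             r1 = 1
--             r2 = 0
--             for nn in dic[c]:
--                 if nn == p:
--                     continue
--                 s = memo[c][nn]
--                 r1 += s[0]
--                 r2 += s[1]
--             r2 += r1
--             memo[p][c] = [r1, r2]
--         else:
--             if p in memo and c in memo[p]:
--                 continue
--             if p not in memo:
--                 memo[p] = {}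
--             stack.append((p, c, True))
--             for nn in reversed(dic[c]):
--                 if nn != p:
--                     stack.append((c, nn, False))
--     return memo[pn][cn]
-- ===== Notes on version B (the rewrite author's own statement) =====
-- stated objective: alternative
-- what changed: A's memoized recursion is replaced by an explicit iterative post-order DFS over a frame stack (pre-visit frames expand children, post-visit frames recompute the two sums from the freshly memoized child entries and write memo[parent][node]), with the same cache-hit short-circuit and identical memo side effects.
import Mathlib
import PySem

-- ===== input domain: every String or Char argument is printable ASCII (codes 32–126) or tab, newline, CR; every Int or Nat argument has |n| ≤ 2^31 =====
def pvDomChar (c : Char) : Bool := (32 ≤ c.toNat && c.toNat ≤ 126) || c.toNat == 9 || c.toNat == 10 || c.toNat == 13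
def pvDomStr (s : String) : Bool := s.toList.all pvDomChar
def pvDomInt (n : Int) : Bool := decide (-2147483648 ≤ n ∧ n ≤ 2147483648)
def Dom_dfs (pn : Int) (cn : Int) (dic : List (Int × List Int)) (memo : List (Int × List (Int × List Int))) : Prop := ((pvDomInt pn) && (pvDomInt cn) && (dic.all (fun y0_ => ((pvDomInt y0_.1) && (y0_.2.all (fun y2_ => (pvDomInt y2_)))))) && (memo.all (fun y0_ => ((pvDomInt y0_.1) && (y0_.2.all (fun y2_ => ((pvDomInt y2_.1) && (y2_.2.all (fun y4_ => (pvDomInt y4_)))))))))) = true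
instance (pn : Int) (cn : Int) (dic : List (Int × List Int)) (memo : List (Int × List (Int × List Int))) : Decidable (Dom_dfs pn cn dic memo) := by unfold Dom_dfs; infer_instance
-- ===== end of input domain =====

-- B replaces A's recursion by an explicit iterative post-order DFS over a frame stack (same memo
-- side effects as A; the equivalence proved is about the RETURN value — both Pythons mutate `memo`
-- identically wherever A returns).

-- Shared primitives: both Pythons use the same dict operations (memo.get(p,{}).get(c), the
-- `if p not in memo: memo[p] = {}` step, and `memo[p][c] = v`); ported once, used by both ports.
abbrev DicT : Type := PySem.Dict Int (List Int)
abbrev MemoT : Type := PySem.Dict Int (PySem.Dict Int (List Int))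

-- `pn in memo and cn in memo[pn]` / `memo[pn][cn]` combined: first-level then second-level lookup
def lookupM (m : MemoT) (p c : Int) : Option (List Int) := (m.getD p PySem.Dict.empty).get? c
-- `if p not in memo: memo[p] = {}`
def ensureM (m : MemoT) (p : Int) : MemoT := if m.contains p then m else m.insert p PySem.Dict.empty
-- `memo[p][c] = v` (only ever executed with p present, after ensureM)
def writeM (m : MemoT) (p c : Int) (v : List Int) : MemoT :=
  m.modify p PySem.Dict.empty (fun d => d.insert c v)
-- the dict arguments as Python receives them (last occurrence of a duplicated key wins, like dict())
def toDic (dic : List (Int × List Int)) : DicT := PySem.Dict.ofList dic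
def toMemo (memo : List (Int × List (Int × List Int))) : MemoT :=
  PySem.Dict.ofList (memo.map (fun kv => (kv.1, PySem.Dict.ofList kv.2)))

-- Fuel bounds (totality guards only; within Pre_ they exceed the real recursion depth / loop count).
def adjPairs (dicD : DicT) : List (Int × Int) :=
  dicD.items.flatMap (fun kv => kv.2.map (fun e => (kv.1, e)))
def fuelA (dicD : DicT) : Nat := (adjPairs dicD).dedup.length + 2
def baseB (dicD : DicT) : Nat := (adjPairs dicD).length + 2
def fuelB (dicD : DicT) : Nat := (baseB dicD) ^ (fuelA dicD) + 1

-- ===== PORT A =====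
-- literal transliteration of A's recursion; the Python call `dfs(cn, nn, dic, memo)` mutates memo,
-- here the memo is threaded explicitly; `none` = fuel exhausted or a Python exception
mutual
def goA (fuel : Nat) (pn cn : Int) (dicD : DicT) (m : MemoT) : Option (List Int × MemoT) :=
  match fuel with
  | 0 => none
  | f + 1 =>
    match lookupM m pn cn with
    | some v => some (v, m)                           -- `if pn in memo and cn in memo[pn]: return memo[pn][cn]`
    | none =>
      let m1 := ensureM m pn                          -- `if pn not in memo: memo[pn] = {}`
      match dicD.get? cn with
      | none => none                                  -- `dic[cn]` raises KeyError
      | some ns =>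
        match foldChA f pn cn dicD ns 1 0 m1 with     -- `r1 = 1; r2 = 0; for nn in dic[cn]: ...`
        | none => none
        | some (r1, r2, m2) =>
          some ([r1, r2 + r1], writeM m2 pn cn [r1, r2 + r1])   -- `r2 += r1; memo[pn][cn] = [r1, r2]; return memo[pn][cn]`

def foldChA (fuel : Nat) (pn cn : Int) (dicD : DicT) (l : List Int) (r1 r2 : Int) (m : MemoT) :
    Option (Int × Int × MemoT) :=
  match l with
  | [] => some (r1, r2, m)
  | nn :: t =>
    if nn = pn then foldChA fuel pn cn dicD t r1 r2 m      -- `if nn == pn: continue`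
    else
      match goA fuel cn nn dicD m with                     -- `r = dfs(cn, nn, dic, memo)`
      | none => none
      | some (r, m2) =>
        match PySem.List.pyGet? r 0, PySem.List.pyGet? r 1 with    -- `r1 += r[0]; r2 += r[1]`
        | some a, some b => foldChA fuel pn cn dicD t (r1 + a) (r2 + b) m2
        | _, _ => none
end

def dfs (pn : Int) (cn : Int) (dic : List (Int × List Int)) (memo : List (Int × List (Int × List Int))) : List Int :=
  match goA (fuelA (toDic dic)) pn cn (toDic dic) (toMemo memo) with
  | some (v, _) => v
  | none => []          -- fuel exhausted: only where the Python raises or never terminates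

-- ===== PORT B =====
-- `r1 = 1; r2 = 0; for nn in dic[c]: ... s = memo[c][nn]; r1 += s[0]; r2 += s[1]` (post-visit)
def postAccum (p c : Int) (l : List Int) (m : MemoT) (r1 r2 : Int) : Option (Int × Int) :=
  match l with
  | [] => some (r1, r2)
  | nn :: t =>
    if nn = p then postAccum p c t m r1 r2
    else
      match lookupM m c nn with
      | none => none                                  -- `memo[c][nn]` raises KeyError
      | some s =>
        match PySem.List.pyGet? s 0, PySem.List.pyGet? s 1 with
        | some a, some b => postAccum p c t m (r1 + a) (r2 + b)
        | _, _ => none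

-- the `while stack:` loop; the list head is the top of the Python stack (`pop()` = head), so the
-- Python push order — `append((p,c,True))`, then children in `reversed(dic[c])` — leaves the
-- children in original order ON TOP of the (p,c,True) frame:
def loopB (fuel : Nat) (stack : List (Int × Int × Bool)) (dicD : DicT) (m : MemoT) : Option MemoT :=
  match fuel with
  | 0 => none
  | f + 1 =>
    match stack with
    | [] => some m
    | (p, c, post) :: rest =>
      if post then
        match dicD.get? c with
        | none => none
        | some ns =>
          match postAccum p c ns m 1 0 with
          | none => none
          | some (r1, r2) => loopB f rest dicD (writeM m p c [r1, r2 + r1])   -- `r2 += r1; memo[p][c] = [r1, r2]`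
      else
        if (lookupM m p c).isSome then loopB f rest dicD m    -- `if p in memo and c in memo[p]: continue`
        else
          match dicD.get? c with
          | none => none                                      -- `dic[c]` raises KeyError
          | some ns =>
            loopB f ((ns.filter (fun nn => nn != p)).map (fun nn => (c, nn, false)) ++ (p, c, true) :: rest)
              dicD (ensureM m p)

def dfs_alt (pn : Int) (cn : Int) (dic : List (Int × List Int)) (memo : List (Int × List (Int × List Int))) : List Int :=
  let dicD := toDic dic
  let memoD := toMemo memo
  match lookupM memoD pn cn with
  | some v => v                                       -- `if pn in memo and cn in memo[pn]: return memo[pn][cn]`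
  | none =>
    match loopB (fuelB dicD) [(pn, cn, false)] dicD memoD with
    | some mf =>
      match lookupM mf pn cn with                     -- `return memo[pn][cn]`
      | some v => v
      | none => []                                    -- unreachable: the finished loop has written memo[pn][cn]
    | none => []                                      -- fuel exhausted: only where the Python loop never terminates or raises

-- ===== PRECONDITION & SPEC =====
-- Pre_dfs holds exactly where Python A returns normally: it excludes only the inputs on which A
-- raises (KeyError: some reached node is missing from dic; IndexError: a cached memo entry of
-- length < 2 is consumed) or never terminates (a reachable cycle of the edge-pair graph not cut by
-- the memo).  It is computed by a reachability analysis of the pair graph, not by running A.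
def termHit (memoD : MemoT) (s : Int × Int) : Bool := (lookupM memoD s.1 s.2).isSome
def childrenOfS (dicD : DicT) (memoD : MemoT) (s : Int × Int) : List (Int × Int) :=
  if termHit memoD s then []
  else (((dicD.get? s.2).getD []).filter (fun e => e != s.1)).map (fun e => (s.2, e))
def hasWalk (dicD : DicT) (memoD : MemoT) : Nat → (Int × Int) → Bool
  | 0, _ => true
  | k+1, s => (childrenOfS dicD memoD s).any (hasWalk dicD memoD k)
def reachIter (dicD : DicT) (memoD : MemoT) : Nat → List (Int × Int) → List (Int × Int)
  | 0, l => l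
  | k+1, l => reachIter dicD memoD k ((l ++ l.flatMap (childrenOfS dicD memoD)).dedup)
def okState (dicD : DicT) (memoD : MemoT) (s : Int × Int) : Bool :=
  match lookupM memoD s.1 s.2 with
  | some v => decide (2 ≤ v.length)         -- a consumed cached entry needs indices 0 and 1
  | none => (dicD.get? s.2).isSome          -- an expanded node needs its adjacency list
def preB (pn cn : Int) (dic : List (Int × List Int)) (memo : List (Int × List (Int × List Int))) : Bool :=
  let dicD := toDic dic
  let memoD := toMemo memo
  if termHit memoD (pn, cn) then true       -- immediate cache hit: A returns the cached value as is
  else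
    ((reachIter dicD memoD (fuelA dicD) [(pn, cn)]).all (okState dicD memoD))
      && !(hasWalk dicD memoD (fuelA dicD) (pn, cn))
def Pre_dfs (pn : Int) (cn : Int) (dic : List (Int × List Int)) (memo : List (Int × List (Int × List Int))) : Prop :=
  preB pn cn dic memo = true
instance (pn : Int) (cn : Int) (dic : List (Int × List Int)) (memo : List (Int × List (Int × List Int))) : Decidable (Pre_dfs pn cn dic memo) := by unfold Pre_dfs; infer_instance

def pvWitness_dfs : Int × Int × (List (Int × List Int)) × (List (Int × List (Int × List Int))) :=
  (0, 1, [(1, [2]), (2, [1, 3]), (3, [2])], [])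

def Spec_dfs (pn : Int) (cn : Int) (dic : List (Int × List Int)) (memo : List (Int × List (Int × List Int))) (out : List Int) : Prop := out = dfs_alt pn cn dic memo
instance (pn : Int) (cn : Int) (dic : List (Int × List Int)) (memo : List (Int × List (Int × List Int))) (out : List Int) : Decidable (Spec_dfs pn cn dic memo out) := by unfold Spec_dfs; infer_instance

-- ===== CLAIM (what is proved, stated in full; the proofs are below) =====
def Claim_equal_dfs : Prop := ∀ (pn : Int) (cn : Int) (dic : List (Int × List Int)) (memo : List (Int × List (Int × List Int))), Dom_dfs pn cn dic memo → Pre_dfs pn cn dic memo → Spec_dfs pn cn dic memo (dfs pn cn dic memo)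

-- ===== LEMMAS AND PROOFS =====

-- ---- dict-lookup facts for the shared primitives ----
theorem lookupM_ensure (m : MemoT) (p x y : Int) : lookupM (ensureM m p) x y = lookupM m x y := by
  unfold lookupM ensureM
  by_cases h : m.contains p
  · simp [h]
  · simp only [Bool.not_eq_true] at h
    simp only [h, Bool.false_eq_true, ite_false]
    rw [PySem.Dict.getD_insert]
    by_cases hx : x = p
    · subst hx
      rw [if_pos rfl, PySem.Dict.getD_of_not_contains m _ h]
    · rw [if_neg hx]

theorem lookupM_write_self (m : MemoT) (p c : Int) (v : List Int) :
    lookupM (writeM m p c v) p c = some v := by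
  unfold lookupM writeM
  rw [PySem.Dict.getD_modify, if_pos rfl, PySem.Dict.get?_insert_self]

theorem lookupM_write_ne (m : MemoT) (p c x y : Int) (v : List Int) (h : ¬ (x = p ∧ y = c)) :
    lookupM (writeM m p c v) x y = lookupM m x y := by
  unfold lookupM writeM
  rw [PySem.Dict.getD_modify]
  by_cases hx : x = p
  · subst hx
    rw [if_pos rfl]
    have hy : y ≠ c := fun hc => h ⟨rfl, hc⟩
    rw [PySem.Dict.get?_insert_of_ne _ _ hy]
  · rw [if_neg hx]

-- ---- unfolding equations for the mutual recursion (proof-local restatements) ----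
theorem goA_zero (pn cn : Int) (dicD : DicT) (m : MemoT) : goA 0 pn cn dicD m = none := by
  rw [goA]

theorem goA_succ (f : Nat) (pn cn : Int) (dicD : DicT) (m : MemoT) :
    goA (f + 1) pn cn dicD m =
      (match lookupM m pn cn with
       | some v => some (v, m)
       | none =>
         match dicD.get? cn with
         | none => none
         | some ns =>
           match foldChA f pn cn dicD ns 1 0 (ensureM m pn) with
           | none => none
           | some (r1, r2, m2) => some ([r1, r2 + r1], writeM m2 pn cn [r1, r2 + r1])) := by
  rw [goA]

theorem foldChA_nil (f : Nat) (pn cn : Int) (dicD : DicT) (r1 r2 : Int) (m : MemoT) :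
    foldChA f pn cn dicD [] r1 r2 m = some (r1, r2, m) := by
  rw [foldChA]

theorem foldChA_cons (f : Nat) (pn cn : Int) (dicD : DicT) (nn : Int) (t : List Int) (r1 r2 : Int) (m : MemoT) :
    foldChA f pn cn dicD (nn :: t) r1 r2 m =
      (if nn = pn then foldChA f pn cn dicD t r1 r2 m
       else
         match goA f cn nn dicD m with
         | none => none
         | some (r, m2) =>
           match PySem.List.pyGet? r 0, PySem.List.pyGet? r 1 with
           | some a, some b => foldChA f pn cn dicD t (r1 + a) (r2 + b) m2
           | _, _ => none) := by
  rw [foldChA]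

-- ---- fuel monotonicity ----
theorem goA_mono : ∀ (f : Nat),
    (∀ pn cn dicD m r, goA f pn cn dicD m = some r → goA (f + 1) pn cn dicD m = some r) ∧
    (∀ pn cn dicD l r1 r2 m r, foldChA f pn cn dicD l r1 r2 m = some r →
      foldChA (f + 1) pn cn dicD l r1 r2 m = some r) := by
  intro f
  induction f with
  | zero =>
    refine ⟨?_, ?_⟩
    · intro pn cn dicD m r h
      rw [goA_zero] at h
      exact absurd h (by simp)
    · intro pn cn dicD l
      induction l with
      | nil => intro r1 r2 m r h; rw [foldChA_nil] at h ⊢; exact h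
      | cons nn t iht =>
        intro r1 r2 m r h
        rw [foldChA_cons] at h ⊢
        by_cases hnn : nn = pn
        · rw [if_pos hnn] at h ⊢
          exact iht _ _ _ _ h
        · rw [if_neg hnn] at h ⊢
          rw [goA_zero] at h
          simp at h
  | succ f ih =>
    obtain ⟨ihG, ihF⟩ := ih
    have hG : ∀ pn cn dicD m r, goA (f + 1) pn cn dicD m = some r →
        goA (f + 1 + 1) pn cn dicD m = some r := by
      intro pn cn dicD m r h
      rw [goA_succ] at h ⊢
      cases hl : lookupM m pn cn with
      | some v => simp only [hl] at h ⊢; exact h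
      | none =>
        simp only [hl] at h ⊢
        cases hd : dicD.get? cn with
        | none => simp [hd] at h
        | some ns =>
          simp only [hd] at h ⊢
          cases hf : foldChA f pn cn dicD ns 1 0 (ensureM m pn) with
          | none => simp [hf] at h
          | some res =>
            obtain ⟨r1, r2, m2⟩ := res
            rw [ihF _ _ _ _ _ _ _ _ hf]
            simp only [hf] at h
            exact h
    refine ⟨hG, ?_⟩
    intro pn cn dicD l
    induction l with
    | nil => intro r1 r2 m r h; rw [foldChA_nil] at h ⊢; exact h
    | cons nn t iht =>
      intro r1 r2 m r h
      rw [foldChA_cons] at h ⊢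
      by_cases hnn : nn = pn
      · rw [if_pos hnn] at h ⊢
        exact iht _ _ _ _ h
      · rw [if_neg hnn] at h ⊢
        cases hg : goA (f + 1) cn nn dicD m with
        | none => simp [hg] at h
        | some rm =>
          obtain ⟨rr, m2⟩ := rm
          rw [hG _ _ _ _ _ hg]
          simp only [hg] at h
          cases ha : PySem.List.pyGet? rr 0 <;> cases hb : PySem.List.pyGet? rr 1 <;>
            simp only [ha, hb] at h ⊢
          · exact absurd h (by simp)
          · exact absurd h (by simp)
          · exact absurd h (by simp)
          · exact iht _ _ _ _ h

theorem loopB_succ (f : Nat) (p c : Int) (post : Bool) (rest : List (Int × Int × Bool)) (dicD : DicT) (m : MemoT) :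
    loopB (f + 1) ((p, c, post) :: rest) dicD m =
      (if post then
        match dicD.get? c with
        | none => none
        | some ns =>
          match postAccum p c ns m 1 0 with
          | none => none
          | some (r1, r2) => loopB f rest dicD (writeM m p c [r1, r2 + r1])
      else
        if (lookupM m p c).isSome then loopB f rest dicD m
        else
          match dicD.get? c with
          | none => none
          | some ns =>
            loopB f ((ns.filter (fun nn => nn != p)).map (fun nn => (c, nn, false)) ++ (p, c, true) :: rest)
              dicD (ensureM m p)) := rfl

theorem loopB_mono : ∀ (f : Nat) (s : List (Int × Int × Bool)) (dicD : DicT) (m : MemoT) (r : MemoT),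
    loopB f s dicD m = some r → loopB (f + 1) s dicD m = some r := by
  intro f
  induction f with
  | zero => intro s dicD m r h; simp [loopB] at h
  | succ f ih =>
    intro s dicD m r h
    match s with
    | [] => exact h
    | (p, c, post) :: rest =>
      rw [loopB_succ] at h ⊢
      by_cases hp : post = true
      · subst hp
        simp only [ite_true] at h ⊢
        cases hd : dicD.get? c with
        | none => simp [hd] at h
        | some ns =>
          simp only [hd] at h ⊢
          cases hpa : postAccum p c ns m 1 0 with
          | none => simp [hpa] at h
          | some rr =>
            obtain ⟨r1, r2⟩ := rr
            simp only [hpa] at h ⊢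
            exact ih _ _ _ _ h
      · simp only [Bool.not_eq_true] at hp
        subst hp
        simp only [Bool.false_eq_true, ite_false] at h ⊢
        by_cases hl : (lookupM m p c).isSome
        · rw [if_pos hl] at h ⊢
          exact ih _ _ _ _ h
        · rw [if_neg hl] at h ⊢
          cases hd : dicD.get? c with
          | none => simp [hd] at h
          | some ns =>
            simp only [hd] at h ⊢
            exact ih _ _ _ _ h

theorem loopB_mono_le (f g : Nat) (h : f ≤ g) (s : List (Int × Int × Bool)) (dicD : DicT) (m : MemoT)
    (r : MemoT) (hr : loopB f s dicD m = some r) : loopB g s dicD m = some r := by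
  obtain ⟨k, rfl⟩ := Nat.exists_eq_add_of_le h
  clear h
  induction k with
  | zero => exact hr
  | succ k ih => exact loopB_mono (f + k) _ _ _ _ ih

-- ---- memo entries once written never change; a finished call has written its own pair ----
def presM (m m' : MemoT) : Prop := ∀ x y w, lookupM m x y = some w → lookupM m' x y = some w

theorem goA_pres : ∀ (f : Nat),
    (∀ pn cn dicD m v m', goA f pn cn dicD m = some (v, m') →
      presM m m' ∧ lookupM m' pn cn = some v) ∧
    (∀ pn cn dicD l r1 r2 m r1' r2' mK, foldChA f pn cn dicD l r1 r2 m = some (r1', r2', mK) →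
      presM m mK) := by
  intro f
  induction f with
  | zero =>
    refine ⟨?_, ?_⟩
    · intro pn cn dicD m v m' h
      rw [goA_zero] at h
      exact absurd h (by simp)
    · intro pn cn dicD l
      induction l with
      | nil =>
        intro r1 r2 m r1' r2' mK h
        rw [foldChA_nil] at h
        obtain ⟨-, -, rfl⟩ : r1 = r1' ∧ r2 = r2' ∧ m = mK := by
          simpa using h
        exact fun x y w hw => hw
      | cons nn t iht =>
        intro r1 r2 m r1' r2' mK h
        rw [foldChA_cons] at h
        by_cases hnn : nn = pn
        · rw [if_pos hnn] at h
          exact iht _ _ _ _ _ _ h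
        · rw [if_neg hnn] at h
          rw [goA_zero] at h
          simp at h
  | succ f ih =>
    obtain ⟨ihG, ihF⟩ := ih
    have hG : ∀ pn cn dicD m v m', goA (f + 1) pn cn dicD m = some (v, m') →
        presM m m' ∧ lookupM m' pn cn = some v := by
      intro pn cn dicD m v m' h
      rw [goA_succ] at h
      cases hl : lookupM m pn cn with
      | some w =>
        simp only [hl] at h
        obtain ⟨rfl, rfl⟩ : w = v ∧ m = m' := by simpa using h
        exact ⟨fun x y w hw => hw, hl⟩
      | none =>
        simp only [hl] at h
        cases hd : dicD.get? cn with
        | none => simp [hd] at h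
        | some ns =>
          simp only [hd] at h
          cases hf : foldChA f pn cn dicD ns 1 0 (ensureM m pn) with
          | none => simp [hf] at h
          | some res =>
            obtain ⟨r1, r2, m2⟩ := res
            simp only [hf] at h
            obtain ⟨rfl, rfl⟩ : [r1, r2 + r1] = v ∧ writeM m2 pn cn [r1, r2 + r1] = m' := by
              simpa using h
            have hpres2 : presM m m2 := by
              intro x y w hw
              have hw1 : lookupM (ensureM m pn) x y = some w := by
                rw [lookupM_ensure]; exact hw
              exact ihF _ _ _ _ _ _ _ _ _ _ hf _ _ _ hw1
            refine ⟨?_, lookupM_write_self _ _ _ _⟩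
            intro x y w hw
            have hne : ¬ (x = pn ∧ y = cn) := by
              rintro ⟨rfl, rfl⟩
              rw [hw] at hl
              exact absurd hl (by simp)
            rw [lookupM_write_ne _ _ _ _ _ _ hne]
            exact hpres2 _ _ _ hw
    refine ⟨hG, ?_⟩
    intro pn cn dicD l
    induction l with
    | nil =>
      intro r1 r2 m r1' r2' mK h
      rw [foldChA_nil] at h
      obtain ⟨-, -, rfl⟩ : r1 = r1' ∧ r2 = r2' ∧ m = mK := by simpa using h
      exact fun x y w hw => hw
    | cons nn t iht =>
      intro r1 r2 m r1' r2' mK h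
      rw [foldChA_cons] at h
      by_cases hnn : nn = pn
      · rw [if_pos hnn] at h
        exact iht _ _ _ _ _ _ h
      · rw [if_neg hnn] at h
        cases hg : goA (f + 1) cn nn dicD m with
        | none => simp [hg] at h
        | some rm =>
          obtain ⟨rr, m2⟩ := rm
          simp only [hg] at h
          cases ha : PySem.List.pyGet? rr 0 <;> cases hb : PySem.List.pyGet? rr 1 <;>
            simp only [ha, hb] at h
          · exact absurd h (by simp)
          · exact absurd h (by simp)
          · exact absurd h (by simp)
          · intro x y w hw
            exact iht _ _ _ _ _ _ h _ _ _ ((hG _ _ _ _ _ _ hg).1 _ _ _ hw)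

-- ---- the post-visit recomputation reads exactly the values the recursion accumulated ----
theorem postAccum_of_foldChA (f : Nat) (pn cn : Int) (dicD : DicT) :
    ∀ (l : List Int) (r1 r2 : Int) (m : MemoT) (r1' r2' : Int) (mK : MemoT),
      foldChA f pn cn dicD l r1 r2 m = some (r1', r2', mK) →
      postAccum pn cn l mK r1 r2 = some (r1', r2') := by
  intro l
  induction l with
  | nil =>
    intro r1 r2 m r1' r2' mK h
    rw [foldChA_nil] at h
    obtain ⟨rfl, rfl, -⟩ : r1 = r1' ∧ r2 = r2' ∧ m = mK := by simpa using h
    rfl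
  | cons nn t iht =>
    intro r1 r2 m r1' r2' mK h
    rw [foldChA_cons] at h
    unfold postAccum
    by_cases hnn : nn = pn
    · rw [if_pos hnn] at h
      rw [if_pos hnn]
      exact iht _ _ _ _ _ _ h
    · rw [if_neg hnn] at h
      rw [if_neg hnn]
      cases hg : goA f cn nn dicD m with
      | none => simp [hg] at h
      | some rm =>
        obtain ⟨rr, m2⟩ := rm
        simp only [hg] at h
        cases ha : PySem.List.pyGet? rr 0 <;> cases hb : PySem.List.pyGet? rr 1 <;>
          simp only [ha, hb] at h
        · exact absurd h (by simp)
        · exact absurd h (by simp)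
        · exact absurd h (by simp)
        · have hrr : lookupM mK cn nn = some rr := by
            have h2 : lookupM m2 cn nn = some rr := ((goA_pres f).1 _ _ _ _ _ _ hg).2
            exact (goA_pres f).2 _ _ _ _ _ _ _ _ _ _ h _ _ _ h2
          rw [hrr]
          simp only [ha, hb]
          exact iht _ _ _ _ _ _ h

-- ---- forward simulation: the stack machine replays the recursion (quantitative fuel bound) ----
theorem ns_len_le (dicD : DicT) (c : Int) (ns : List Int) (h : dicD.get? c = some ns) :
    ns.length + 2 ≤ baseB dicD := by
  have hmem : (c, ns) ∈ dicD.items := PySem.Dict.mem_items_of_get?_eq_some dicD h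
  unfold baseB adjPairs
  have hlen : ns.length ≤ (dicD.items.flatMap (fun kv => kv.2.map (fun e => (kv.1, e)))).length := by
    rw [List.length_flatMap]
    have hm2 : ns.length ∈ dicD.items.map (fun kv => (kv.2.map (fun e => ((kv.1 : Int), e))).length) := by
      refine List.mem_map.2 ⟨(c, ns), hmem, ?_⟩
      simp
    exact List.single_le_sum (fun _ _ => Nat.zero_le _) _ hm2
  omega

theorem simGo : ∀ (f : Nat) (dicD : DicT),
    (∀ pn cn m v m', goA f pn cn dicD m = some (v, m') →
      ∀ rest fb mf, loopB fb rest dicD m' = some mf →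
        loopB ((baseB dicD) ^ f + fb) ((pn, cn, false) :: rest) dicD m = some mf) ∧
    (∀ pn cn l r1 r2 m r1' r2' mK, foldChA f pn cn dicD l r1 r2 m = some (r1', r2', mK) →
      ∀ rest fb mf, loopB fb rest dicD mK = some mf →
        loopB (l.length * (baseB dicD) ^ f + fb)
          ((l.filter (fun nn => nn != pn)).map (fun nn => (cn, nn, false)) ++ rest) dicD m = some mf) := by
  intro f dicD
  have hbase : 2 ≤ baseB dicD := by unfold baseB; omega
  have hpow : ∀ k : Nat, 1 ≤ baseB dicD ^ k := fun k => Nat.one_le_pow _ _ (by omega)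
  induction f with
  | zero =>
    refine ⟨?_, ?_⟩
    · intro pn cn m v m' h
      rw [goA_zero] at h
      exact absurd h (by simp)
    · intro pn cn l
      induction l with
      | nil =>
        intro r1 r2 m r1' r2' mK h rest fb mf hcont
        rw [foldChA_nil] at h
        obtain ⟨-, -, rfl⟩ : r1 = r1' ∧ r2 = r2' ∧ m = mK := by simpa using h
        simpa using hcont
      | cons nn t iht =>
        intro r1 r2 m r1' r2' mK h rest fb mf hcont
        rw [foldChA_cons] at h
        by_cases hnn : nn = pn
        · rw [if_pos hnn] at h
          have hfilt : (nn != pn) = false := by simp [hnn]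
          rw [List.filter_cons_of_neg (by simp [hfilt])]
          have := iht _ _ _ _ _ _ h rest fb mf hcont
          exact loopB_mono_le _ _ (by simp only [List.length_cons, Nat.succ_mul]; omega) _ _ _ _ this
        · rw [if_neg hnn] at h
          rw [goA_zero] at h
          simp at h
  | succ f ih =>
    obtain ⟨ihG, ihF⟩ := ih
    have hG : ∀ pn cn m v m', goA (f + 1) pn cn dicD m = some (v, m') →
        ∀ rest fb mf, loopB fb rest dicD m' = some mf →
          loopB ((baseB dicD) ^ (f + 1) + fb) ((pn, cn, false) :: rest) dicD m = some mf := by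
      intro pn cn m v m' h rest fb mf hcont
      have hX : 1 ≤ baseB dicD ^ (f + 1) := hpow _
      have hsplit : baseB dicD ^ (f + 1) + fb = (baseB dicD ^ (f + 1) - 1 + fb) + 1 := by omega
      rw [hsplit, loopB_succ]
      rw [goA_succ] at h
      cases hl : lookupM m pn cn with
      | some w =>
        simp only [hl] at h
        obtain ⟨rfl, rfl⟩ : w = v ∧ m = m' := by simpa using h
        simp only [Bool.false_eq_true, ite_false, Option.isSome_some, ite_true]
        exact loopB_mono_le _ _ (by omega) _ _ _ _ hcont
      | none =>
        simp only [hl] at h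
        simp only [Bool.false_eq_true, ite_false, Option.isSome_none, ite_false]
        cases hd : dicD.get? cn with
        | none => simp [hd] at h
        | some ns =>
          simp only [hd] at h
          cases hf : foldChA f pn cn dicD ns 1 0 (ensureM m pn) with
          | none => simp [hf] at h
          | some res =>
            obtain ⟨r1, r2, m2⟩ := res
            simp only [hf] at h
            obtain ⟨rfl, rfl⟩ : [r1, r2 + r1] = v ∧ writeM m2 pn cn [r1, r2 + r1] = m' := by
              simpa using h
            have hpost : loopB (fb + 1) ((pn, cn, true) :: rest) dicD m2 = some mf := by
              rw [loopB_succ]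
              simp only [ite_true, hd]
              rw [postAccum_of_foldChA f pn cn dicD ns 1 0 _ r1 r2 m2 hf]
              exact hcont
            have hrun := ihF pn cn ns 1 0 (ensureM m pn) r1 r2 m2 hf
              ((pn, cn, true) :: rest) (fb + 1) mf hpost
            refine loopB_mono_le _ _ ?_ _ _ _ _ hrun
            have h1 : ns.length + 2 ≤ baseB dicD := ns_len_le dicD cn ns hd
            have h2 : (ns.length + 2) * baseB dicD ^ f ≤ baseB dicD ^ (f + 1) := by
              rw [pow_succ, Nat.mul_comm (baseB dicD ^ f) (baseB dicD)]
              exact Nat.mul_le_mul_right _ h1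
            have h3 : 1 ≤ baseB dicD ^ f := hpow _
            have h4 : ns.length * baseB dicD ^ f + 2 ≤ baseB dicD ^ (f + 1) := by
              have : (ns.length + 2) * baseB dicD ^ f
                  = ns.length * baseB dicD ^ f + 2 * baseB dicD ^ f := by ring
              omega
            omega
    refine ⟨hG, ?_⟩
    intro pn cn l
    induction l with
    | nil =>
      intro r1 r2 m r1' r2' mK h rest fb mf hcont
      rw [foldChA_nil] at h
      obtain ⟨-, -, rfl⟩ : r1 = r1' ∧ r2 = r2' ∧ m = mK := by simpa using h
      simpa using hcont
    | cons nn t iht =>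
      intro r1 r2 m r1' r2' mK h rest fb mf hcont
      rw [foldChA_cons] at h
      by_cases hnn : nn = pn
      · rw [if_pos hnn] at h
        rw [List.filter_cons_of_neg (by simp [hnn])]
        have := iht _ _ _ _ _ _ h rest fb mf hcont
        exact loopB_mono_le _ _ (by simp only [List.length_cons, Nat.succ_mul]; omega) _ _ _ _ this
      · rw [if_neg hnn] at h
        cases hg : goA (f + 1) cn nn dicD m with
        | none => simp [hg] at h
        | some rm =>
          obtain ⟨rr, m2⟩ := rm
          simp only [hg] at h
          cases ha : PySem.List.pyGet? rr 0 <;> cases hb : PySem.List.pyGet? rr 1 <;>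
            simp only [ha, hb] at h
          · exact absurd h (by simp)
          · exact absurd h (by simp)
          · exact absurd h (by simp)
          · rw [List.filter_cons_of_pos (by simp [hnn])]
            have hrest := iht _ _ _ _ _ _ h rest fb mf hcont
            have := hG cn nn m rr m2 hg _ _ _ hrest
            refine loopB_mono_le _ _ (le_of_eq ?_) _ _ _ _ (by simpa using this)
            simp only [List.length_cons, Nat.succ_mul]
            omega

-- ---- reverse simulation: a finished stack machine run yields a finished recursion ----
def runFrames (f : Nat) (dicD : DicT) : List (Int × Int × Bool) → MemoT → Option MemoT
  | [], m => some m
  | (p, c, post) :: t, m =>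
    if post then
      match dicD.get? c with
      | none => none
      | some ns =>
        match postAccum p c ns m 1 0 with
        | none => none
        | some (r1, r2) => runFrames f dicD t (writeM m p c [r1, r2 + r1])
    else
      match goA f p c dicD m with
      | none => none
      | some (_, m2) => runFrames f dicD t m2

theorem runFrames_cons_post (f : Nat) (dicD : DicT) (p c : Int) (t : List (Int × Int × Bool)) (m : MemoT) :
    runFrames f dicD ((p, c, true) :: t) m =
      (match dicD.get? c with
       | none => none
       | some ns =>
         match postAccum p c ns m 1 0 with
         | none => none
         | some (r1, r2) => runFrames f dicD t (writeM m p c [r1, r2 + r1])) := rfl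

theorem runFrames_cons_go (f : Nat) (dicD : DicT) (p c : Int) (t : List (Int × Int × Bool)) (m : MemoT) :
    runFrames f dicD ((p, c, false) :: t) m =
      (match goA f p c dicD m with
       | none => none
       | some (_, m2) => runFrames f dicD t m2) := rfl

theorem runFrames_mono (f : Nat) (dicD : DicT) :
    ∀ (s : List (Int × Int × Bool)) (m r : MemoT),
      runFrames f dicD s m = some r → runFrames (f + 1) dicD s m = some r := by
  intro s
  induction s with
  | nil => intro m r h; exact h
  | cons fr t iht =>
    obtain ⟨p, c, post⟩ := fr
    intro m r h
    unfold runFrames at h ⊢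
    by_cases hp : post = true
    · subst hp
      simp only [ite_true] at h ⊢
      cases hd : dicD.get? c with
      | none => simp [hd] at h
      | some ns =>
        simp only [hd] at h ⊢
        cases hpa : postAccum p c ns m 1 0 with
        | none => simp [hpa] at h
        | some rr =>
          obtain ⟨r1, r2⟩ := rr
          simp only [hpa] at h ⊢
          exact iht _ _ h
    · simp only [Bool.not_eq_true] at hp
      subst hp
      simp only [Bool.false_eq_true, ite_false] at h ⊢
      cases hg : goA f p c dicD m with
      | none => simp [hg] at h
      | some rm =>
        obtain ⟨v, m2⟩ := rm
        rw [(goA_mono f).1 _ _ _ _ _ hg]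
        simp only [hg] at h
        exact iht _ _ h

theorem runFrames_append (f : Nat) (dicD : DicT) (a b : List (Int × Int × Bool)) (m : MemoT) :
    runFrames f dicD (a ++ b) m = (runFrames f dicD a m).bind (runFrames f dicD b) := by
  induction a generalizing m with
  | nil => simp [runFrames]
  | cons fr t iht =>
    obtain ⟨p, c, post⟩ := fr
    rw [List.cons_append]
    by_cases hp : post = true
    · subst hp
      rw [runFrames_cons_post, runFrames_cons_post]
      cases hd : dicD.get? c with
      | none => simp
      | some ns =>
        dsimp only
        cases hpa : postAccum p c ns m 1 0 with
        | none => simp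
        | some rr =>
          obtain ⟨r1, r2⟩ := rr
          dsimp only
          exact iht _
    · simp only [Bool.not_eq_true] at hp
      subst hp
      rw [runFrames_cons_go, runFrames_cons_go]
      cases hg : goA f p c dicD m with
      | none => simp
      | some rm =>
        obtain ⟨v, m2⟩ := rm
        dsimp only
        exact iht _

theorem runFrames_frames_pres (f : Nat) (dicD : DicT) (p c : Int) :
    ∀ (l : List Int) (m mK : MemoT),
      runFrames f dicD ((l.filter (fun nn => nn != p)).map (fun nn => (c, nn, false))) m = some mK →
      presM m mK := by
  intro l
  induction l with
  | nil =>
    intro m mK h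
    simp only [List.filter_nil, List.map_nil] at h
    obtain rfl : m = mK := by simpa [runFrames] using h
    exact fun x y w hw => hw
  | cons nn t iht =>
    intro m mK h
    by_cases hnn : nn = p
    · rw [List.filter_cons_of_neg (by simp [hnn])] at h
      exact iht _ _ h
    · rw [List.filter_cons_of_pos (by simp [hnn]), List.map_cons] at h
      unfold runFrames at h
      simp only [Bool.false_eq_true, ite_false] at h
      cases hg : goA f c nn dicD m with
      | none => simp [hg] at h
      | some rm =>
        obtain ⟨v, m2⟩ := rm
        simp only [hg] at h
        intro x y w hw
        exact iht _ _ h _ _ _ (((goA_pres f).1 _ _ _ _ _ _ hg).1 _ _ _ hw)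

theorem foldChA_of_runFrames (f : Nat) (dicD : DicT) (p c : Int) :
    ∀ (l : List Int) (m mK : MemoT),
      runFrames f dicD ((l.filter (fun nn => nn != p)).map (fun nn => (c, nn, false))) m = some mK →
      ∀ r1 r2 r1' r2', postAccum p c l mK r1 r2 = some (r1', r2') →
        foldChA f p c dicD l r1 r2 m = some (r1', r2', mK) := by
  intro l
  induction l with
  | nil =>
    intro m mK h r1 r2 r1' r2' hpost
    simp only [List.filter_nil, List.map_nil] at h
    obtain rfl : m = mK := by simpa [runFrames] using h
    obtain ⟨rfl, rfl⟩ : r1 = r1' ∧ r2 = r2' := by simpa [postAccum] using hpost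
    rw [foldChA_nil]
  | cons nn t iht =>
    intro m mK h r1 r2 r1' r2' hpost
    unfold postAccum at hpost
    rw [foldChA_cons]
    by_cases hnn : nn = p
    · rw [List.filter_cons_of_neg (by simp [hnn])] at h
      rw [if_pos hnn] at hpost
      rw [if_pos hnn]
      exact iht _ _ h _ _ _ _ hpost
    · rw [List.filter_cons_of_pos (by simp [hnn]), List.map_cons] at h
      rw [runFrames_cons_go] at h
      rw [if_neg hnn] at hpost
      rw [if_neg hnn]
      cases hg : goA f c nn dicD m with
      | none => simp [hg] at h
      | some rm =>
        obtain ⟨v, m2⟩ := rm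
        simp only [hg] at h
        have hv : lookupM mK c nn = some v := by
          have h2 : lookupM m2 c nn = some v := ((goA_pres f).1 _ _ _ _ _ _ hg).2
          exact runFrames_frames_pres f dicD p c t m2 mK h _ _ _ h2
        rw [hv] at hpost
        dsimp only
        cases ha : PySem.List.pyGet? v 0 <;> cases hb : PySem.List.pyGet? v 1 <;>
          simp only [ha, hb] at hpost
        · exact absurd hpost (by simp)
        · exact absurd hpost (by simp)
        · exact absurd hpost (by simp)
        · dsimp only
          exact iht _ _ h _ _ _ _ hpost

theorem runFrames_of_loopB : ∀ (fb : Nat) (s : List (Int × Int × Bool)) (dicD : DicT) (m mf : MemoT),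
    loopB fb s dicD m = some mf → runFrames fb dicD s m = some mf := by
  intro fb
  induction fb with
  | zero => intro s dicD m mf h; simp [loopB] at h
  | succ fb ih =>
    intro s dicD m mf h
    match s with
    | [] =>
      obtain rfl : m = mf := by simpa [loopB] using h
      rfl
    | (p, c, post) :: rest =>
      rw [loopB_succ] at h
      by_cases hp : post = true
      · subst hp
        rw [runFrames_cons_post]
        simp only [ite_true] at h
        cases hd : dicD.get? c with
        | none => simp [hd] at h
        | some ns =>
          simp only [hd] at h ⊢
          cases hpa : postAccum p c ns m 1 0 with
          | none => simp [hpa] at h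
          | some rr =>
            obtain ⟨r1, r2⟩ := rr
            simp only [hpa] at h ⊢
            exact runFrames_mono _ _ _ _ _ (ih _ _ _ _ h)
      · simp only [Bool.not_eq_true] at hp
        subst hp
        rw [runFrames_cons_go]
        simp only [Bool.false_eq_true, ite_false] at h
        by_cases hl : (lookupM m p c).isSome
        · rw [if_pos hl] at h
          obtain ⟨v, hv⟩ := Option.isSome_iff_exists.1 hl
          have hgo : goA (fb + 1) p c dicD m = some (v, m) := by
            rw [goA_succ, hv]
          rw [hgo]
          exact runFrames_mono _ _ _ _ _ (ih _ _ _ _ h)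

        · rw [if_neg hl] at h
          cases hd : dicD.get? c with
          | none => simp [hd] at h
          | some ns =>
            simp only [hd] at h
            have hrun := ih _ _ _ _ h
            rw [runFrames_append] at hrun
            cases hK : runFrames fb dicD
                ((ns.filter (fun nn => nn != p)).map (fun nn => (c, nn, false))) (ensureM m p) with
            | none => rw [hK] at hrun; simp at hrun
            | some mK =>
              rw [hK] at hrun
              simp only [Option.bind_some] at hrun
              rw [runFrames_cons_post] at hrun
              simp only [hd] at hrun
              cases hpa : postAccum p c ns mK 1 0 with
              | none => rw [hpa] at hrun; simp at hrun
              | some rr =>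
                obtain ⟨r1, r2⟩ := rr
                rw [hpa] at hrun
                have hnone : lookupM m p c = none := by
                  cases hlv : lookupM m p c with
                  | none => rfl
                  | some w => rw [hlv] at hl; simp at hl
                have hfold : foldChA fb p c dicD ns 1 0 (ensureM m p) = some (r1, r2, mK) :=
                  foldChA_of_runFrames fb dicD p c ns (ensureM m p) mK hK 1 0 r1 r2 hpa
                have hgo : goA (fb + 1) p c dicD m
                    = some ([r1, r2 + r1], writeM mK p c [r1, r2 + r1]) := by
                  rw [goA_succ]
                  simp only [hnone, hd, hfold]
                rw [hgo]
                exact runFrames_mono _ _ _ _ _ hrun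

-- ---- pending-walk machinery: a successful call has no pending infinite walk, and preserves them ----
def stepR (dicD : DicT) (u v : Int × Int) : Prop :=
  v.1 = u.2 ∧ v.2 ∈ ((dicD.get? u.2).getD []) ∧ v.2 ≠ u.1

def unsetP (m : MemoT) (s : Int × Int) : Prop := lookupM m s.1 s.2 = none

def IsPWalk (dicD : DicT) (m : MemoT) (w : Nat → Int × Int) : Prop :=
  ∀ i, stepR dicD (w i) (w (i + 1)) ∧ unsetP m (w i)

def PWalk (dicD : DicT) (m : MemoT) (s : Int × Int) : Prop :=
  ∃ w, w 0 = s ∧ IsPWalk dicD m w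

theorem goA_nocyc : ∀ (f : Nat) (dicD : DicT),
    (∀ pn cn m v m', goA f pn cn dicD m = some (v, m') →
      (∀ w, IsPWalk dicD m w → IsPWalk dicD m' w) ∧ ¬ PWalk dicD m (pn, cn)) ∧
    (∀ pn cn l r1 r2 m r1' r2' mK, foldChA f pn cn dicD l r1 r2 m = some (r1', r2', mK) →
      (∀ w, IsPWalk dicD m w → IsPWalk dicD mK w)) := by
  intro f
  induction f with
  | zero =>
    intro dicD
    refine ⟨?_, ?_⟩
    · intro pn cn m v m' h
      rw [goA_zero] at h
      exact absurd h (by simp)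
    · intro pn cn l
      induction l with
      | nil =>
        intro r1 r2 m r1' r2' mK h w hw
        rw [foldChA_nil] at h
        obtain ⟨-, -, rfl⟩ : r1 = r1' ∧ r2 = r2' ∧ m = mK := by simpa using h
        exact hw
      | cons nn t iht =>
        intro r1 r2 m r1' r2' mK h
        rw [foldChA_cons] at h
        by_cases hnn : nn = pn
        · rw [if_pos hnn] at h
          exact iht _ _ _ _ _ _ h
        · rw [if_neg hnn] at h
          rw [goA_zero] at h
          simp at h
  | succ f ih =>
    intro dicD
    obtain ⟨ihGo, ihFold⟩ := ih dicD
    have contra : ∀ pn cn l r1 r2 m r', foldChA f pn cn dicD l r1 r2 m = some r' →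
        ∀ e, e ∈ l → e ≠ pn → ¬ PWalk dicD m (cn, e) := by
      intro pn cn l
      induction l with
      | nil =>
        intro r1 r2 m r' h e he
        exact absurd he (by simp)
      | cons nn t iht =>
        intro r1 r2 m r' h e he hne hpw
        rw [foldChA_cons] at h
        by_cases hnn : nn = pn
        · rw [if_pos hnn] at h
          have het : e ∈ t := by
            rcases List.mem_cons.1 he with rfl | ht
            · exact absurd hnn hne
            · exact ht
          exact iht _ _ _ _ h e het hne hpw
        · rw [if_neg hnn] at h
          cases hg : goA f cn nn dicD m with
          | none => simp [hg] at h
          | some rm =>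
            obtain ⟨rr, m2⟩ := rm
            simp only [hg] at h
            by_cases he2 : nn = e
            · subst he2
              exact (ihGo cn nn m rr m2 hg).2 hpw
            · have het : e ∈ t := by
                rcases List.mem_cons.1 he with rfl | ht
                · exact absurd rfl he2
                · exact ht
              cases ha : PySem.List.pyGet? rr 0 <;> cases hb : PySem.List.pyGet? rr 1 <;>
                simp only [ha, hb] at h
              · exact absurd h (by simp)
              · exact absurd h (by simp)
              · exact absurd h (by simp)
              · obtain ⟨w, h0, hw⟩ := hpw
                exact iht _ _ _ _ h e het hne ⟨w, h0, (ihGo cn nn m rr m2 hg).1 w hw⟩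
    have goNew : ∀ pn cn m v m', goA (f + 1) pn cn dicD m = some (v, m') →
        (∀ w, IsPWalk dicD m w → IsPWalk dicD m' w) ∧ ¬ PWalk dicD m (pn, cn) := by
      intro pn cn m v m' h
      rw [goA_succ] at h
      cases hl : lookupM m pn cn with
      | some w0 =>
        simp only [hl] at h
        obtain ⟨rfl, rfl⟩ : w0 = v ∧ m = m' := by simpa using h
        refine ⟨fun w hw => hw, ?_⟩
        rintro ⟨w, h0, hw⟩
        have hu := (hw 0).2
        rw [h0] at hu
        unfold unsetP at hu
        rw [hl] at hu
        exact absurd hu (by simp)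
      | none =>
        simp only [hl] at h
        cases hd : dicD.get? cn with
        | none => simp [hd] at h
        | some ns =>
          simp only [hd] at h
          cases hf : foldChA f pn cn dicD ns 1 0 (ensureM m pn) with
          | none => simp [hf] at h
          | some res =>
            obtain ⟨r1, r2, m2⟩ := res
            simp only [hf] at h
            obtain ⟨rfl, rfl⟩ : [r1, r2 + r1] = v ∧ writeM m2 pn cn [r1, r2 + r1] = m' := by
              simpa using h
            have hnocyc : ¬ PWalk dicD m (pn, cn) := by
              rintro ⟨w, h0, hw⟩
              have hstep := (hw 0).1
              rw [h0] at hstep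
              obtain ⟨h1, h2, h3⟩ := hstep
              rw [hd] at h2
              simp only [Option.getD_some] at h2
              have hw1 : w 1 = (cn, (w 1).2) := Prod.ext h1 rfl
              have hw' : IsPWalk dicD (ensureM m pn) (fun i => w (i + 1)) := by
                intro i
                refine ⟨(hw (i + 1)).1, ?_⟩
                unfold unsetP
                rw [lookupM_ensure]
                exact (hw (i + 1)).2
              exact contra pn cn ns 1 0 (ensureM m pn) _ hf (w 1).2 h2 h3
                ⟨fun i => w (i + 1), hw1, hw'⟩
            refine ⟨?_, hnocyc⟩
            intro w hw
            have hw2 : IsPWalk dicD m2 w := by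
              have hwe : IsPWalk dicD (ensureM m pn) w := fun i =>
                ⟨(hw i).1, by unfold unsetP; rw [lookupM_ensure]; exact (hw i).2⟩
              exact ihFold pn cn ns 1 0 _ r1 r2 m2 hf w hwe
            intro i
            refine ⟨(hw i).1, ?_⟩
            unfold unsetP
            by_cases hi : w i = (pn, cn)
            · refine absurd ⟨fun j => w (i + j), hi, fun j => ⟨(hw (i + j)).1, (hw (i + j)).2⟩⟩ hnocyc
            · rw [lookupM_write_ne]
              · exact (hw2 i).2
              · rintro ⟨ha, hb⟩
                exact hi (Prod.ext ha hb)
    refine ⟨goNew, ?_⟩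
    intro pn cn l
    induction l with
    | nil =>
      intro r1 r2 m r1' r2' mK h w hw
      rw [foldChA_nil] at h
      obtain ⟨-, -, rfl⟩ : r1 = r1' ∧ r2 = r2' ∧ m = mK := by simpa using h
      exact hw
    | cons nn t iht =>
      intro r1 r2 m r1' r2' mK h
      rw [foldChA_cons] at h
      by_cases hnn : nn = pn
      · rw [if_pos hnn] at h
        exact iht _ _ _ _ _ _ h
      · rw [if_neg hnn] at h
        cases hg : goA (f + 1) cn nn dicD m with
        | none => simp [hg] at h
        | some rm =>
          obtain ⟨rr, m2⟩ := rm
          simp only [hg] at h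
          cases ha : PySem.List.pyGet? rr 0 <;> cases hb : PySem.List.pyGet? rr 1 <;>
            simp only [ha, hb] at h
          · exact absurd h (by simp)
          · exact absurd h (by simp)
          · exact absurd h (by simp)
          · intro w hw
            exact iht _ _ _ _ _ _ h w ((goNew cn nn m rr m2 hg).1 w hw)

-- ---- fuel fuelA always suffices for a successful recursion ----
theorem stepR_mem_adj (dicD : DicT) (u v : Int × Int) (h : stepR dicD u v) :
    v ∈ (adjPairs dicD).dedup := by
  obtain ⟨h1, h2, h3⟩ := h
  rw [List.mem_dedup]
  cases hd : dicD.get? u.2 with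
  | none => rw [hd] at h2; simp at h2
  | some ns =>
    rw [hd] at h2
    simp only [Option.getD_some] at h2
    unfold adjPairs
    refine List.mem_flatMap.2 ⟨(u.2, ns), PySem.Dict.mem_items_of_get?_eq_some dicD hd, ?_⟩
    have : v = (u.2, v.2) := Prod.ext h1 rfl
    rw [this]
    exact List.mem_map_of_mem h2

theorem chain_mem_adj (dicD : DicT) :
    ∀ (l : List (Int × Int)) (x : Int × Int), List.IsChain (stepR dicD) (x :: l) →
      ∀ y ∈ l, y ∈ (adjPairs dicD).dedup := by
  intro l
  induction l with
  | nil => intro x h y hy; exact absurd hy (by simp)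
  | cons z t iht =>
    intro x h y hy
    obtain ⟨hxz, hrest⟩ := List.isChain_cons_cons.1 h
    rcases List.mem_cons.1 hy with rfl | hyt
    · exact stepR_mem_adj dicD x y hxz
    · exact iht z hrest y hyt

theorem getElem_idx_congr {α : Type} (l : List α) {i j : Nat} (h : i = j) (hi : i < l.length) :
    l[i] = l[j]'(h ▸ hi) := by subst h; rfl

theorem cyc_walk (dicD : DicT) (m : MemoT) (pn cn : Int) (S₂ : List (Int × Int))
    (hch : List.IsChain (stepR dicD) (((pn, cn) :: S₂) ++ [(pn, cn)]))
    (hunset : ∀ x ∈ (pn, cn) :: S₂, unsetP m x) :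
    PWalk dicD m (pn, cn) := by
  set C : List (Int × Int) := (pn, cn) :: S₂ with hCdef
  have hn : 0 < C.length := by simp [hCdef]
  have hC0 : ∀ (k : Nat) (hk : k < C.length), k = 0 → C[k] = (pn, cn) := by
    intro k hk hk0
    subst hk0
    simp [hCdef]
  have hM : C ≠ [] := by simp [hCdef]
  have hlast : stepR dicD (C.getLast hM) (pn, cn) := by
    obtain ⟨-, -, hx⟩ := List.isChain_append.1 hch
    exact hx _ (List.getLast?_eq_some_getLast hM ▸ rfl) _ rfl
  have hCL : ∀ (k : Nat) (hk : k < C.length), k = C.length - 1 → C[k] = C.getLast hM := by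
    intro k hk hkL
    rw [List.getLast_eq_getElem hM]
    exact getElem_idx_congr C hkL hk
  have hchC : List.IsChain (stepR dicD) C := hch.prefix (List.prefix_append _ _)
  refine ⟨fun i => C[i % C.length]'(Nat.mod_lt _ hn), ?_, ?_⟩
  · exact hC0 _ _ (Nat.zero_mod _)
  · intro i
    refine ⟨?_, hunset _ (List.getElem_mem _)⟩
    beta_reduce
    have hj : i % C.length < C.length := Nat.mod_lt _ hn
    by_cases hwrap : i % C.length + 1 = C.length
    · have h1 : (i + 1) % C.length = 0 := by
        rw [← Nat.mod_add_mod, hwrap, Nat.mod_self]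
      rw [hC0 _ _ h1, hCL _ _ (by omega)]
      exact hlast
    · have h1 : (i + 1) % C.length = i % C.length + 1 := by
        rw [← Nat.mod_add_mod]
        exact Nat.mod_eq_of_lt (by omega)
      have hstep := List.isChain_iff_getElem.1 hchC (i % C.length) (by omega)
      rw [getElem_idx_congr C h1]
      exact hstep

theorem goA_down : ∀ (f : Nat) (dicD : DicT),
    ∀ pn cn m v m' (S : List (Int × Int)), goA f pn cn dicD m = some (v, m') →
      List.IsChain (stepR dicD) (S ++ [(pn, cn)]) → (∀ x ∈ S, unsetP m x) → S.Nodup →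
      goA (fuelA dicD - S.length) pn cn dicD m = some (v, m') ∧ (∀ x ∈ S, unsetP m' x) := by
  intro f
  induction f with
  | zero =>
    intro dicD pn cn m v m' S h
    rw [goA_zero] at h
    exact absurd h (by simp)
  | succ f ih =>
    intro dicD pn cn m v m' S h hchain hunset hnodup
    -- (pn, cn) cannot occur in the chain of in-progress pairs: that would be a pending cycle
    have hnotin : (pn, cn) ∉ S := by
      intro hin
      obtain ⟨S₁, S₂, rfl⟩ := List.append_of_mem hin
      have hsuf : (((pn, cn) :: S₂) ++ [(pn, cn)]) <:+ (S₁ ++ (pn, cn) :: S₂) ++ [(pn, cn)] := by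
        refine ⟨S₁, ?_⟩
        simp
      have hch2 := hchain.suffix hsuf
      have hunset2 : ∀ x ∈ (pn, cn) :: S₂, unsetP m x := by
        intro x hx
        refine hunset x ?_
        rcases List.mem_cons.1 hx with rfl | hx2
        · exact List.mem_append.2 (Or.inr (List.mem_cons_self))
        · exact List.mem_append.2 (Or.inr (List.mem_cons_of_mem _ hx2))
      exact ((goA_nocyc (f + 1) dicD).1 _ _ _ _ _ h).2 (cyc_walk dicD m pn cn S₂ hch2 hunset2)
    -- length bound: the chain is made of distinct adjacency pairs (plus an arbitrary first element)
    have hlenS : S.length + 1 ≤ fuelA dicD := by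
      cases S with
      | nil => simp only [List.length_nil]; unfold fuelA; omega
      | cons s0 S' =>
        have hch' : List.IsChain (stepR dicD) (s0 :: (S' ++ [(pn, cn)])) := by
          simpa using hchain
        have hsub : ∀ y ∈ S', y ∈ (adjPairs dicD).dedup := fun y hy =>
          chain_mem_adj dicD _ s0 hch' y (List.mem_append.2 (Or.inl hy))
        have hnd : S'.Nodup := hnodup.of_cons
        have hcard : S'.length ≤ (adjPairs dicD).dedup.length := by
          classical
          calc S'.length = S'.toFinset.card := (List.toFinset_card_of_nodup hnd).symm
            _ ≤ (adjPairs dicD).dedup.toFinset.card := by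
                refine Finset.card_le_card ?_
                intro x hx
                rw [List.mem_toFinset] at hx ⊢
                exact hsub x hx
            _ ≤ (adjPairs dicD).dedup.length := List.toFinset_card_le _
        unfold fuelA
        simp only [List.length_cons]
        omega
    rw [goA_succ] at h
    cases hl : lookupM m pn cn with
    | some w0 =>
      simp only [hl] at h
      obtain ⟨rfl, rfl⟩ : w0 = v ∧ m = m' := by simpa using h
      obtain ⟨k, hk⟩ : ∃ k, fuelA dicD - S.length = k + 1 := ⟨fuelA dicD - S.length - 1, by omega⟩
      refine ⟨?_, hunset⟩
      rw [hk, goA_succ, hl]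
    | none =>
      simp only [hl] at h
      cases hd : dicD.get? cn with
      | none => simp [hd] at h
      | some ns =>
        simp only [hd] at h
        cases hf : foldChA f pn cn dicD ns 1 0 (ensureM m pn) with
        | none => simp [hf] at h
        | some res =>
          obtain ⟨r1, r2, m2⟩ := res
          simp only [hf] at h
          obtain ⟨rfl, rfl⟩ : [r1, r2 + r1] = v ∧ writeM m2 pn cn [r1, r2 + r1] = m' := by
            simpa using h
          have hnodup' : (S ++ [(pn, cn)]).Nodup := by
            rw [List.nodup_append]
            refine ⟨hnodup, List.nodup_singleton _, ?_⟩
            intro a ha b hb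
            obtain rfl : b = (pn, cn) := by simpa using hb
            intro hab
            rw [hab] at ha
            exact hnotin ha
          have foldDown : ∀ l, (∀ x ∈ l, x ∈ ns) → ∀ r1 r2 mm r1' r2' mK,
              foldChA f pn cn dicD l r1 r2 mm = some (r1', r2', mK) →
              (∀ x ∈ S ++ [(pn, cn)], unsetP mm x) →
              foldChA (fuelA dicD - (S.length + 1)) pn cn dicD l r1 r2 mm = some (r1', r2', mK) ∧
                (∀ x ∈ S ++ [(pn, cn)], unsetP mK x) := by
            intro l
            induction l with
            | nil =>
              intro hsub r1 r2 mm r1' r2' mK hfl hum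
              rw [foldChA_nil] at hfl
              obtain ⟨rfl, rfl, rfl⟩ : r1 = r1' ∧ r2 = r2' ∧ mm = mK := by simpa using hfl
              exact ⟨foldChA_nil _ _ _ _ _ _ _, hum⟩
            | cons nn t iht =>
              intro hsub r1 r2 mm r1' r2' mK hfl hum
              rw [foldChA_cons] at hfl
              rw [foldChA_cons]
              by_cases hnn : nn = pn
              · rw [if_pos hnn] at hfl
                rw [if_pos hnn]
                exact iht (fun x hx => hsub x (List.mem_cons_of_mem _ hx)) _ _ _ _ _ _ hfl hum
              · rw [if_neg hnn] at hfl
                rw [if_neg hnn]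
                cases hg : goA f cn nn dicD mm with
                | none => simp [hg] at hfl
                | some rm =>
                  obtain ⟨rr, m3⟩ := rm
                  simp only [hg] at hfl
                  have hchild : List.IsChain (stepR dicD) ((S ++ [(pn, cn)]) ++ [(cn, nn)]) := by
                    rw [List.isChain_append]
                    refine ⟨hchain, by simp, ?_⟩
                    intro x hx y hy
                    rw [List.getLast?_concat] at hx
                    simp only [Option.mem_def, Option.some_inj] at hx
                    simp only [List.head?_cons, Option.mem_def, Option.some_inj] at hy
                    subst hx
                    subst hy
                    refine ⟨rfl, ?_, hnn⟩
                    rw [hd]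
                    simpa using hsub nn List.mem_cons_self
                  obtain ⟨hgd, hum2⟩ := ih dicD cn nn mm rr m3 (S ++ [(pn, cn)]) hg hchild hum hnodup'
                  have hlen' : (S ++ [(pn, cn)]).length = S.length + 1 := by simp
                  rw [hlen'] at hgd
                  rw [hgd]
                  cases ha : PySem.List.pyGet? rr 0 <;> cases hb : PySem.List.pyGet? rr 1 <;>
                    simp only [ha, hb] at hfl ⊢
                  · exact absurd hfl (by simp)
                  · exact absurd hfl (by simp)
                  · exact absurd hfl (by simp)
                  · exact iht (fun x hx => hsub x (List.mem_cons_of_mem _ hx)) _ _ _ _ _ _ hfl hum2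
          have hum0 : ∀ x ∈ S ++ [(pn, cn)], unsetP (ensureM m pn) x := by
            intro x hx
            unfold unsetP
            rw [lookupM_ensure]
            rcases List.mem_append.1 hx with hx1 | hx2
            · exact hunset x hx1
            · obtain rfl : x = (pn, cn) := by simpa using hx2
              exact hl
          obtain ⟨hfoldF, humK⟩ := foldDown ns (fun x hx => hx) 1 0 (ensureM m pn) r1 r2 m2 hf hum0
          have hfuel : fuelA dicD - S.length = (fuelA dicD - (S.length + 1)) + 1 := by omega
          refine ⟨?_, ?_⟩
          · rw [hfuel, goA_succ]
            simp only [hl, hd, hfoldF]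
          · intro x hx
            unfold unsetP
            rw [lookupM_write_ne]
            · exact humK x (List.mem_append.2 (Or.inl hx))
            · rintro ⟨ha, hb⟩
              have hxe : x = (pn, cn) := Prod.ext ha hb
              rw [hxe] at hx
              exact hnotin hx

-- ===== VERDICT (by name: the statement is the Claim_ definition above) =====
theorem loopB_one_nil (dicD : DicT) (m : MemoT) : loopB 1 [] dicD m = some m := rfl

theorem dfs_spec : Claim_equal_dfs := by
  intro pn cn dic memo _hdom _hpre
  unfold Spec_dfs dfs dfs_alt
  cases hl : lookupM (toMemo memo) pn cn with
  | some v =>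
    have hk : fuelA (toDic dic) = (fuelA (toDic dic) - 1) + 1 := by unfold fuelA; omega
    rw [hk, goA_succ, hl]
    simp [hl]
  | none =>
    cases hgo : goA (fuelA (toDic dic)) pn cn (toDic dic) (toMemo memo) with
    | none =>
      simp only [hl]
      cases hlb : loopB (fuelB (toDic dic)) [(pn, cn, false)] (toDic dic) (toMemo memo) with
      | none => rfl
      | some mf =>
        exfalso
        have hrun := runFrames_of_loopB _ _ _ _ _ hlb
        rw [runFrames_cons_go] at hrun
        cases hg2 : goA (fuelB (toDic dic)) pn cn (toDic dic) (toMemo memo) with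
        | none => rw [hg2] at hrun; simp at hrun
        | some vm =>
          obtain ⟨v2, m2⟩ := vm
          have hdown := goA_down (fuelB (toDic dic)) (toDic dic) pn cn (toMemo memo) v2 m2 [] hg2
            (by simp) (by simp) List.nodup_nil
          rw [List.length_nil, Nat.sub_zero] at hdown
          rw [hdown.1] at hgo
          exact absurd hgo (by simp)
    | some vm =>
      obtain ⟨v, m'⟩ := vm
      have hsim := (simGo (fuelA (toDic dic)) (toDic dic)).1 pn cn (toMemo memo) v m' hgo
        [] 1 m' (loopB_one_nil _ _)
      have hfB : fuelB (toDic dic) = baseB (toDic dic) ^ fuelA (toDic dic) + 1 := rfl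
      rw [← hfB] at hsim
      simp only [hl, hsim]
      have hv : lookupM m' pn cn = some v := ((goA_pres (fuelA (toDic dic))).1 _ _ _ _ _ _ hgo).2
      rw [hv]
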